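-- pv_equiv track=rewrite | github.com/peotr26/nsi-premiere | Langage_Web/ex7.py | max_dico
-- ===== SOURCE A (Python) =====
-- def max_dico(dico: dict) -> tuple:
--     keys = list(dico.keys())
--     values = list(dico.values())
--     maxi = 0
--     for i in range(1, len(dico)):
--         if values[i] > values[maxi]:
--             maxi = i
--     return keys[maxi], values[maxi]
-- ===== SOURCE B (Python) =====
-- def max_dico(dico: dict) -> tuple:
--     return sorted(dico.items(), key=lambda kv: kv[1], reverse=True)[0]
-- ===== Notes on version B (the rewrite author's own statement) =====
-- stated objective: simpler
-- what changed: Replaces the manual index-tracking scan over parallel key/value lists with a one-line stable descending sort by value and taking the front pair; stability of sorted(..., reverse=True) preserves A's first-wins tie-breaking, and [0] on an empty dict raises IndexError just like A.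
-- outside the precondition, e.g. on max_dico({}): A raises IndexError, B raises IndexError
import Mathlib
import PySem

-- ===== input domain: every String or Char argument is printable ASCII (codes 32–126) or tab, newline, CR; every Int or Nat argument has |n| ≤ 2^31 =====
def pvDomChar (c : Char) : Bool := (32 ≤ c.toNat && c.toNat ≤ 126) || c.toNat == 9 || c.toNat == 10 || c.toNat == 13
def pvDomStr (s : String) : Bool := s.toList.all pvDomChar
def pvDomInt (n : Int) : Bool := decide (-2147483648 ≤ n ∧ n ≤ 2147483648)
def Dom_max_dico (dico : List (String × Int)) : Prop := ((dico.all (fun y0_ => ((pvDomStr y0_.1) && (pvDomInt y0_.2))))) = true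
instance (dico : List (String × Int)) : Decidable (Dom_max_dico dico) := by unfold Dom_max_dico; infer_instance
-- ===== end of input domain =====

-- B replaces A's manual index-tracking scan over parallel key/value lists with a stable descending
-- sort by value and taking the front pair (objective: simpler); return-value equivalence only.

-- ===== PORT A =====
def max_dico (dico : List (String × Int)) : String × Int :=
  let keys := dico.map Prod.fst
  let values := dico.map Prod.snd
  let maxi : Int :=
    (PySem.List.pyRange 1 dico.length).foldl
      (fun maxi i =>
        if PySem.List.pyGetD values i 0 > PySem.List.pyGetD values maxi 0 then i else maxi) 0
  (PySem.List.pyGetD keys maxi "", PySem.List.pyGetD values maxi 0)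

-- ===== PORT B =====
def max_dico_alt (dico : List (String × Int)) : String × Int :=
  match PySem.List.pyGet? (PySem.List.sorted dico (fun kv => kv.2) true) 0 with
  | some p => p
  | none => ("", 0)   -- unreachable under Pre_ ([0] of an empty list: Python raises IndexError)

-- ===== PRECONDITION & SPEC =====
-- Pre_ excludes the empty dict, where both A and B raise IndexError; the Nodup conjunct only says
-- the association list really represents a Python dict argument (a dict's keys are unique).
def Pre_max_dico (dico : List (String × Int)) : Prop :=
  dico ≠ [] ∧ (dico.map Prod.fst).Nodup
instance (dico : List (String × Int)) : Decidable (Pre_max_dico dico) := by unfold Pre_max_dico; infer_instance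
def pvWitness_max_dico : (List (String × Int)) := [("a", 3), ("b", 7), ("c", 7)]

def Spec_max_dico (dico : List (String × Int)) (out : String × Int) : Prop := out = max_dico_alt dico
instance (dico : List (String × Int)) (out : String × Int) : Decidable (Spec_max_dico dico out) := by unfold Spec_max_dico; infer_instance

-- ===== CLAIM (what is proved, stated in full; the proofs are below) =====
def Claim_equal_max_dico : Prop := ∀ (dico : List (String × Int)), Dom_max_dico dico → Pre_max_dico dico → Spec_max_dico dico (max_dico dico)

-- ===== LEMMAS AND PROOFS =====

def pvBest (b : String × Int) (t : List (String × Int)) : String × Int :=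
  t.foldl (fun b y => if b.2 < y.2 then y else b) b

lemma pvBest_append (b : String × Int) (t : List (String × Int)) (y : String × Int) :
    pvBest b (t ++ [y]) = if (pvBest b t).2 < y.2 then y else pvBest b t := by
  simp [pvBest]

lemma pyGetD_snd (l : List (String × Int)) (k : Nat) (hk : k < l.length) :
    PySem.List.pyGetD (l.map Prod.snd) (k : Int) 0 = (l.getD k ("", 0)).2 := by
  rw [PySem.List.pyGetD_natCast]
  rw [List.getD_eq_getElem _ _ (by simpa using hk), List.getD_eq_getElem _ _ hk]
  simp

lemma loopA_invariant (l : List (String × Int)) (x : String × Int) (rest : List (String × Int))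
    (hl : l = x :: rest) :
    ∀ n : Nat, 1 ≤ n → n ≤ l.length →
      ∃ m : Nat, (PySem.List.pyRange 1 (n : Int)).foldl
          (fun maxi i =>
            if PySem.List.pyGetD (l.map Prod.snd) i 0 > PySem.List.pyGetD (l.map Prod.snd) maxi 0
            then i else maxi) 0 = (m : Int) ∧ m < n ∧
          l.getD m ("", 0) = pvBest x ((l.take n).drop 1) := by
  intro n h1 h2
  induction n with
  | zero => omega
  | succ k ih =>
    by_cases hk : 1 ≤ k
    · obtain ⟨m, hm, hmk, hbest⟩ := ih hk (by omega)
      have hr : PySem.List.pyRange 1 ((k + 1 : Nat) : Int) =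
          PySem.List.pyRange 1 (k : Int) ++ [(k : Int)] := by
        push_cast
        exact PySem.List.pyRange_one_succ_right (by exact_mod_cast hk)
      have hkl : k < l.length := by omega
      have hml : m < l.length := by omega
      have htake : (l.take (k + 1)).drop 1 = (l.take k).drop 1 ++ [l.getD k ("", 0)] := by
        rw [List.take_add_one]
        have : l[k]? = some (l.getD k ("", 0)) := by
          rw [List.getElem?_eq_getElem hkl, List.getD_eq_getElem _ _ hkl]
        rw [this]
        have hne : l.take k ≠ [] := by
          intro h
          have := congrArg List.length h
          simp [Nat.min_eq_left (le_of_lt hkl)] at this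
          omega
        rcases (List.ne_nil_iff_exists_cons.mp hne) with ⟨a, t, ht⟩
        simp [ht]
      rw [hr, List.foldl_append, hm]
      simp only [List.foldl_cons, List.foldl_nil]
      rw [pyGetD_snd l k hkl, pyGetD_snd l m hml, htake, pvBest_append, ← hbest]
      split_ifs with hcmp
      · exact ⟨k, rfl, by omega, rfl⟩
      · exact ⟨m, rfl, by omega, rfl⟩
    · have hk0 : k = 0 := by omega
      subst hk0
      refine ⟨0, ?_, by omega, ?_⟩
      · simp [PySem.List.pyRange]
      · simp [hl, pvBest]

lemma head?_insertBy (before : (String × Int) → (String × Int) → Bool)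
    (x h : String × Int) (t : List (String × Int)) :
    (PySem.List.insertBy before x (h :: t)).head? = some (if before x h then x else h) := by
  by_cases hb : before x h <;> simp [PySem.List.insertBy, hb]

lemma foldl_insertBy_head? (before : (String × Int) → (String × Int) → Bool)
    (xs : List (String × Int)) :
    ∀ (h : String × Int) (t : List (String × Int)),
      ((xs.foldl (fun acc x => PySem.List.insertBy before x acc) (h :: t)).head?) =
        some (xs.foldl (fun b y => if before y b then y else b) h) := by
  induction xs with
  | nil => intro h t; simp
  | cons y ys ih =>
    intro h t
    simp only [List.foldl_cons]
    rcases hi : PySem.List.insertBy before y (h :: t) with _ | ⟨h2, t2⟩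
    · have := head?_insertBy before y h t
      rw [hi] at this; simp at this
    · have hh : h2 = (if before y h then y else h) := by
        have := head?_insertBy before y h t
        rw [hi] at this; simpa using this
      rw [ih h2 t2, hh]

lemma sorted_rev_head (x : String × Int) (rest : List (String × Int)) :
    (PySem.List.sorted (x :: rest) (fun kv => kv.2) true).head? = some (pvBest x rest) := by
  rw [PySem.List.sorted_rev_eq_foldl_insertBy]
  simp only [List.foldl_cons, PySem.List.insertBy]
  rw [foldl_insertBy_head? (fun a b => decide (b.2 < a.2)) rest x []]
  congr 1
  unfold pvBest
  apply PySem.List.foldl_congr_mem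
  intro b y _
  by_cases h : b.2 < y.2 <;> simp [h]

-- ===== VERDICT (by name: the statement is the Claim_ definition above) =====
theorem max_dico_spec : Claim_equal_max_dico := by
  intro dico _ hpre
  unfold Spec_max_dico
  have hne : dico ≠ [] := hpre.1

  rcases dico with _ | ⟨x, rest⟩
  · exact absurd rfl hne
  set l := x :: rest with hl
  obtain ⟨m, hm, hmlt, hbest⟩ := loopA_invariant l x rest rfl l.length (by simp [hl]) le_rfl
  have hml : m < l.length := by omega
  -- B side value
  have hB : max_dico_alt l = pvBest x rest := by
    unfold max_dico_alt
    have hh := sorted_rev_head x rest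
    rcases hs : PySem.List.sorted (x :: rest) (fun kv => kv.2) true with _ | ⟨p, t⟩
    · rw [hs] at hh; simp at hh
    · rw [hs] at hh
      simp at hh
      simp [PySem.List.pyGet?, PySem.List.pyIdx?, hh]
  -- A side value
  have hA : max_dico l = ((l.getD m ("", 0)).1, (l.getD m ("", 0)).2) := by
    unfold max_dico
    simp only [hm]
    rw [PySem.List.pyGetD_natCast, PySem.List.pyGetD_natCast]
    rw [List.getD_eq_getElem _ _ (by simpa using hml), List.getD_eq_getElem _ _ (by simpa using hml),
        List.getD_eq_getElem _ _ hml]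
    simp
  rw [hA, hB]
  simp only [List.take_length, List.drop_one, hl] at hbest
  simpa [List.getD] using hbest
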